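-- pv_equiv track=rewrite | github.com/rinrinwinwin/PA7 | pa7-chatbot-main/chatbot.py | parse_out_movies
-- ===== SOURCE A (Python) =====
-- def parse_out_movies(s):
--     """Extract movie titles enclosed in quotation marks from text.
--
--     This function parses through the input string and identifies any text
--     enclosed within quotation marks ("), assuming these are movie titles.
--
--     :param s: A string possibly containing movie titles in quotation marks
--     :returns: A tuple containing (list of extracted movie titles, remaining text)
--             - The first element is a list of strings found within quotation marks
--             - The second element is the input string with all quoted text removed
--     """
--     res = []
--     track = False
--     curr = ""
--     full = ""
--     for x in s:
--         if x in ['"']: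
--             track = not(track)
--             if not(track):
--                 res.append(curr)
--                 curr = ""
--         else:
--             if track:
--                 curr += x
--             else:
--                 full += x
--     return res, full
-- ===== SOURCE B (Python) =====
-- def parse_out_movies(s):
--     parts = s.split('"')
--     titles = parts[1::2]
--     if len(parts) % 2 == 0:
--         # odd number of quotes: the trailing segment is after an unterminated
--         # opening quote; it is neither a title nor part of the remaining text
--         titles = titles[:-1]
--     return titles, "".join(parts[0::2])
-- ===== Notes on version B (the rewrite author's own statement) =====
-- stated objective: simpler
-- what changed: Replaces the char-by-char boolean state machine by one split on the quote character: titles are the odd-indexed segments (last one dropped when the quote count is odd), remaining text is the join of the even-indexed segments.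
import Mathlib
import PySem

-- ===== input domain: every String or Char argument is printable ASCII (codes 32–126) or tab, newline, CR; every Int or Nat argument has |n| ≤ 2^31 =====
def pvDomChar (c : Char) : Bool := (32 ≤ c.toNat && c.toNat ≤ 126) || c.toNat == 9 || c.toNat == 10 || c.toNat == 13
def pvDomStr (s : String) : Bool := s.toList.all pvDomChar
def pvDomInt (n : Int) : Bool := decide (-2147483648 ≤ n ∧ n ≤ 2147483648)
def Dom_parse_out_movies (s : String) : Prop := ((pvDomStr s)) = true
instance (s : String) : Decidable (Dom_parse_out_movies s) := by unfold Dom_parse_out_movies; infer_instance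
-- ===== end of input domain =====

-- B replaces A's char-by-char quote state machine by a single split on '"' (simpler).

-- ===== PORT A =====
-- state = (res, track, curr, full); strings built as List Char (Lean's String.append is opaque)
def pvStepA (st : List (List Char) × Bool × List Char × List Char) (x : Char) :
    List (List Char) × Bool × List Char × List Char :=
  match st with
  | (res, track, curr, full) =>
    if x = '"' then
      let track' := !track
      if track' = false then (res ++ [curr], track', ([] : List Char), full)
      else (res, track', curr, full)
    else
      if track = true then (res, track, curr ++ [x], full)
      else (res, track, curr, full ++ [x])

def parse_out_movies (s : String) : List String × String :=
  let st := s.toList.foldl pvStepA ([], false, [], [])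
  (st.1.map String.ofList, String.ofList st.2.2.2)

-- ===== PORT B =====
-- hand port of Python's s.split('"') for the single-character separator '"':
-- exact — Python keeps empty segments, and ''.split('"') == ['']
def pvSplitQ : List Char → List (List Char)
  | [] => [[]]
  | c :: cs =>
    if c = '"' then [] :: pvSplitQ cs
    else
      match pvSplitQ cs with
      | [] => [[c]]          -- unreachable: pvSplitQ never returns []
      | p :: ps => (c :: p) :: ps

-- parts[0::2] / parts[1::2]: the even- / odd-indexed elements (exact for step-2 slices)
mutual
def pvEvens {α : Type} : List α → List α
  | [] => []
  | x :: xs => x :: pvOdds xs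
def pvOdds {α : Type} : List α → List α
  | [] => []
  | _ :: xs => pvEvens xs
end

def parse_out_movies_alt (s : String) : List String × String :=
  let parts := pvSplitQ s.toList
  let titles := pvOdds parts
  let titles := if parts.length % 2 = 0 then titles.dropLast else titles
  (titles.map String.ofList, String.ofList (pvEvens parts).flatten)   -- "".join = flatten

-- ===== PRECONDITION & SPEC =====
def Spec_parse_out_movies (s : String) (out : List String × String) : Prop := out = parse_out_movies_alt s
instance (s : String) (out : List String × String) : Decidable (Spec_parse_out_movies s out) := by unfold Spec_parse_out_movies; infer_instance

-- ===== CLAIM (what is proved, stated in full; the proofs are below) =====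
def Claim_equal_parse_out_movies : Prop := ∀ (s : String), Dom_parse_out_movies s → Spec_parse_out_movies s (parse_out_movies s)

-- ===== LEMMAS AND PROOFS =====

-- specification functions: what A's loop produces, phrased on the split parts
mutual
def pvSpecF (curr : List Char) : List (List Char) → List (List Char) × List Char
  | [] => ([], [])
  | p :: ps =>
    let t := pvSpecT curr ps
    (t.1, p ++ t.2)
def pvSpecT (curr : List Char) : List (List Char) → List (List Char) × List Char
  | [] => ([], [])
  | [_] => ([], [])
  | p :: q :: qs =>
    let t := pvSpecF [] (q :: qs)
    ((curr ++ p) :: t.1, t.2)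
end

theorem pvSplitQ_ne_nil (cs : List Char) : pvSplitQ cs ≠ [] := by
  cases cs with
  | nil => simp [pvSplitQ]
  | cons c cs =>
    simp only [pvSplitQ]
    split
    · simp
    · split <;> simp

theorem pvSplitQ_cons_ne (c : Char) (cs : List Char) (h : c ≠ '"') (p : List Char)
    (ps : List (List Char)) (hs : pvSplitQ cs = p :: ps) :
    pvSplitQ (c :: cs) = (c :: p) :: ps := by
  simp [pvSplitQ, h, hs]

theorem pvSplitQ_quote (cs : List Char) : pvSplitQ ('"' :: cs) = [] :: pvSplitQ cs := by
  simp [pvSplitQ]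

theorem pvLoop_spec (cs : List Char) : ∀ (res : List (List Char)) (curr full : List Char),
    ((cs.foldl pvStepA (res, false, curr, full)).1 = res ++ (pvSpecF curr (pvSplitQ cs)).1 ∧
     (cs.foldl pvStepA (res, false, curr, full)).2.2.2 = full ++ (pvSpecF curr (pvSplitQ cs)).2)
    ∧
    ((cs.foldl pvStepA (res, true, curr, full)).1 = res ++ (pvSpecT curr (pvSplitQ cs)).1 ∧
     (cs.foldl pvStepA (res, true, curr, full)).2.2.2 = full ++ (pvSpecT curr (pvSplitQ cs)).2) := by
  induction cs with
  | nil =>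
    intro res curr full
    simp [pvSpecF, pvSpecT, pvSplitQ]
  | cons c cs ih =>
    intro res curr full
    obtain ⟨p, ps, hps⟩ : ∃ p ps, pvSplitQ cs = p :: ps := by
      cases hsa : pvSplitQ cs with
      | nil => exact absurd hsa (pvSplitQ_ne_nil cs)
      | cons p ps => exact ⟨p, ps, rfl⟩
    by_cases hc : c = '"'
    · subst hc
      rw [pvSplitQ_quote, hps]
      constructor
      · -- false → true
        simp only [List.foldl_cons, pvStepA, if_true, Bool.false_eq_true, reduceIte]
        rcases (ih res curr full).2 with ⟨h1, h2⟩
        rw [hps] at h1 h2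
        constructor
        · simpa [pvSpecF] using h1
        · simpa [pvSpecF] using h2
      · -- true → false, emit curr
        simp only [List.foldl_cons, pvStepA, if_true, Bool.not_true]
        rcases (ih (res ++ [curr]) [] full).1 with ⟨h1, h2⟩
        rw [hps] at h1 h2
        constructor
        · simp only [pvSpecT]
          rw [h1]
          simp
        · simp only [pvSpecT]
          rw [h2]
    · have hsc := pvSplitQ_cons_ne c cs hc p ps hps
      rw [hsc]
      constructor
      · simp only [List.foldl_cons, pvStepA, if_neg hc, Bool.false_eq_true, reduceIte]
        rcases (ih res curr (full ++ [c])).1 with ⟨h1, h2⟩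
        rw [hps] at h1 h2
        constructor
        · simp only [pvSpecF] at h1 ⊢
          rw [h1]
        · simp only [pvSpecF] at h2 ⊢
          rw [h2]
          simp
      · simp only [List.foldl_cons, pvStepA, if_neg hc, if_true]
        rcases (ih res (curr ++ [c]) full).2 with ⟨h1, h2⟩
        rw [hps] at h1 h2
        cases ps with
        | nil =>
          constructor
          · simp only [pvSpecT] at h1 ⊢
            simpa using h1
          · simp only [pvSpecT] at h2 ⊢
            simpa using h2
        | cons q qs =>
          constructor
          · simp only [pvSpecT] at h1 ⊢
            rw [h1]
            simp
          · simp only [pvSpecT] at h2 ⊢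
            rw [h2]

theorem pvSpec_snd (l : List (List Char)) : ∀ curr,
    (pvSpecF curr l).2 = (pvEvens l).flatten ∧ (pvSpecT curr l).2 = (pvOdds l).flatten := by
  induction l with
  | nil => intro curr; simp [pvSpecF, pvSpecT, pvEvens, pvOdds]
  | cons p ps ih =>
    intro curr
    constructor
    · simp [pvSpecF, pvEvens, (ih curr).2]
    · cases ps with
      | nil => simp [pvSpecT, pvOdds, pvEvens]
      | cons q qs => simp [pvSpecT, pvOdds, (ih []).1]

theorem pvLen_evens_odds {α : Type} (l : List α) :
    (pvEvens l).length = (l.length + 1) / 2 ∧ (pvOdds l).length = l.length / 2 := by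
  induction l with
  | nil => simp [pvEvens, pvOdds]
  | cons x xs ih =>
    constructor
    · simp [pvEvens, ih.2]
      omega
    · simp [pvOdds, ih.1]

theorem pvSpec_fst (l : List (List Char)) :
    ((pvSpecF [] l).1 = if l.length % 2 = 0 then (pvOdds l).dropLast else pvOdds l) ∧
    ((pvSpecT [] l).1 = if l.length % 2 = 1 then (pvEvens l).dropLast else pvEvens l) := by
  induction l with
  | nil => simp [pvSpecF, pvSpecT, pvEvens, pvOdds]
  | cons p ps ih =>
    constructor
    · simp only [pvSpecF, pvOdds, List.length_cons]
      rw [ih.2]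
      split_ifs with h1 h2 h2 <;> first | rfl | omega
    · cases ps with
      | nil => simp [pvSpecT, pvEvens, pvOdds]
      | cons q qs =>
        simp only [pvSpecT, pvEvens, List.length_cons]
        rw [ih.1]
        by_cases h : (qs.length + 1) % 2 = 0
        · have h1 : (qs.length + 1 + 1) % 2 = 1 := by omega
          have hne : pvOdds (q :: qs) ≠ [] := by
            have := (pvLen_evens_odds (q :: qs)).2
            intro hnil
            rw [hnil] at this
            simp at this
            omega
          simp [h, h1, List.dropLast_cons_of_ne_nil hne]
        · have h1 : ¬ (qs.length + 1 + 1) % 2 = 1 := by omega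
          simp [h, h1]

-- ===== VERDICT (by name: the statement is the Claim_ definition above) =====
theorem parse_out_movies_spec : Claim_equal_parse_out_movies := by
  intro s _
  unfold Spec_parse_out_movies parse_out_movies parse_out_movies_alt
  rcases (pvLoop_spec s.toList [] [] []).1 with ⟨h1, h2⟩
  simp only [h1, h2, List.nil_append, (pvSpec_snd (pvSplitQ s.toList) []).1,
    (pvSpec_fst (pvSplitQ s.toList)).1]
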